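-- pv_equiv track=rewrite | github.com/Augustuuuuu/Faculdade | 6º Semestre/Computabilidade e Complexidade de Algoritmos/Codigos/Atividade08/comentarioJava.py | reconhece_comentario_java
-- ===== SOURCE A (Python) =====
-- def reconhece_comentario_java(entrada: str) -> bool:
--     """
--     Simulador de Autômato Finito para reconhecer comentários de linha Java (//...).
--
--     Este autômato segue as regras:
--     1. Deve começar com "//".
--     2. Pode ter qualquer caractere depois, exceto quebra de linha.
--     3. Termina com quebra de linha ('\n') ou o fim da entrada.
--     """
--
--     # --- Definição do Autômato ---
--
--     # Estados:
--     Q0 = 0  # Estado inicial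
--     Q1 = 1  # Viu o primeiro caractere '/'
--     Q2 = 2  # Viu '//' (dentro de um comentário)
--     Q3 = 3  # Estado final (viu '\n' após Q2)
--     Q4 = 4  # Estado de erro/rejeição (armadilha)
--
--     # Estado inicial
--     estado_atual = Q0
--
--     # Conjunto de estados finais formais (apenas Q3)
--     estados_finais_formais = {Q3}
--
--     # --- Processamento da Cadeia de Entrada ---
--
--     # Itera por cada caractere da string de entrada
--     for char in entrada:
--
--         # Estado Q0 (Inicial)
--         if estado_atual == Q0:
--             if char == '/':
--                 estado_atual = Q1  # Transição: Q0 -> Q1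
--             else:
--                 estado_atual = Q4  # Inválido: não começou com '/'
--
--         # Estado Q1 (Viu a primeira barra '/')
--         elif estado_atual == Q1:
--             if char == '/':
--                 estado_atual = Q2  # Transição: Q1 -> Q2 (confirmou '//')
--             else:
--                 estado_atual = Q4  # Inválido: não era '//'
--
--         # Estado Q2 (Dentro do comentário '//...')
--         elif estado_atual == Q2:
--             if char == '\n':
--                 estado_atual = Q3  # Transição: Q2 -> Q3 (fim da linha)
--             else:
--                 # Qualquer outro caractere é parte do comentário
--                 estado_atual = Q2  # Permanece em Q2
--
--         # Estado Q3 (Fim da linha, Aceitação)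
--         elif estado_atual == Q3:
--             # Se a string continuar *após* o \n, ela é inválida
--             estado_atual = Q4  # Inválido: lixo após o fim da linha
--
--         # Estado Q4 (Erro/Armadilha)
--         elif estado_atual == Q4:
--             # Uma vez no estado de erro, permanece nele
--             estado_atual = Q4
--
--     # --- Verificação Final (Após processar a string inteira) ---
--
--     # A entrada é aceita se o autômato parou em:
--     # 1. Q2 (regra "fim da entrada")
--     # 2. Q3 (regra "termina com quebra de linha")
--
--     return estado_atual == Q2 or estado_atual in estados_finais_formais
-- ===== SOURCE B (Python) =====
-- def reconhece_comentario_java(entrada: str) -> bool: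
--     if not entrada.startswith('//'):
--         return False
--     idx = entrada.find('\n')
--     return idx == -1 or idx == len(entrada) - 1
-- ===== Notes on version B (the rewrite author's own statement) =====
-- stated objective: simpler
-- what changed: Replaces the explicit 5-state DFA character loop with a prefix check plus a single newline-position test using str.startswith/str.find.
import Mathlib
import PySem

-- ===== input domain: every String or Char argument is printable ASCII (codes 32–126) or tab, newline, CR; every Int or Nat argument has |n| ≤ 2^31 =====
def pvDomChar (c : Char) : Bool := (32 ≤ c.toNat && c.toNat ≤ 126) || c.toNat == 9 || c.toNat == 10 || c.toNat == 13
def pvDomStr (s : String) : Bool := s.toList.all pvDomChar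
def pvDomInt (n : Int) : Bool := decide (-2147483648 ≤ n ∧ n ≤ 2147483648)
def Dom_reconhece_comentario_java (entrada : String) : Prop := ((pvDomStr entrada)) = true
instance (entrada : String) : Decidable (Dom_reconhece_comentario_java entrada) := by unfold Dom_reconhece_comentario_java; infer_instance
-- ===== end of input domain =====

-- B replaces A's explicit 5-state DFA loop by a startswith('//') check plus a single
-- newline-position test (simpler decomposition; same asymptotic cost).


-- ===== PORT A =====
-- the per-character transition of A's for-loop body (estado_atual update)
def pvStep (estado_atual : Nat) (char : Char) : Nat :=
  if estado_atual = 0 then (if char = '/' then 1 else 4)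
  else if estado_atual = 1 then (if char = '/' then 2 else 4)
  else if estado_atual = 2 then (if char = '\n' then 3 else 2)
  else if estado_atual = 3 then 4
  else 4

def reconhece_comentario_java (entrada : String) : Bool :=
  let estados_finais_formais : PySem.Set Nat := PySem.Set.ofList [3]
  let estado_atual := entrada.toList.foldl pvStep 0
  decide (estado_atual = 2) || PySem.Set.contains estados_finais_formais estado_atual

-- ===== PORT B =====
def reconhece_comentario_java_alt (entrada : String) : Bool :=
  if !(PySem.Str.startswith entrada "//") then false
  else
    let idx := PySem.Str.find entrada "\n"
    idx == -1 || idx == (PySem.Str.len entrada : Int) - 1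

-- ===== PRECONDITION & SPEC =====
def Spec_reconhece_comentario_java (entrada : String) (out : Bool) : Prop := out = reconhece_comentario_java_alt entrada
instance (entrada : String) (out : Bool) : Decidable (Spec_reconhece_comentario_java entrada out) := by unfold Spec_reconhece_comentario_java; infer_instance

-- ===== CLAIM (what is proved, stated in full; the proofs are below) =====
def Claim_equal_reconhece_comentario_java : Prop := ∀ (entrada : String), Dom_reconhece_comentario_java entrada → Spec_reconhece_comentario_java entrada (reconhece_comentario_java entrada)

-- ===== LEMMAS AND PROOFS =====

-- trap state stays trapped
theorem pvFoldl_step_four (cs : List Char) : cs.foldl pvStep 4 = 4 := by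
  induction cs with
  | nil => rfl
  | cons c cs ih => simpa [pvStep] using ih

-- after the accepting state Q3, any further character traps
theorem pvFoldl_step_three (cs : List Char) :
    cs.foldl pvStep 3 = if cs = [] then 3 else 4 := by
  cases cs with
  | nil => rfl
  | cons c cs => simp [pvStep, pvFoldl_step_four]

-- the heart of A: the Q2 run is characterised by the first newline position
theorem pvFoldl_step_two (cs : List Char) :
    cs.foldl pvStep 2 =
      if '\n' ∈ cs then (if cs.idxOf '\n' = cs.length - 1 then 3 else 4) else 2 := by
  induction cs with
  | nil => rfl
  | cons c cs ih =>
    by_cases hc : c = '\n'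
    · subst hc
      have h1 : List.foldl pvStep 2 ('\n' :: cs) = List.foldl pvStep 3 cs := by
        simp [pvStep]
      rw [h1, pvFoldl_step_three]
      rcases cs with _ | ⟨d, ds⟩
      · simp
      · simp
    · have hfold : (c :: cs).foldl pvStep 2 = cs.foldl pvStep 2 := by
        simp [pvStep, hc]
      rw [hfold, ih]
      by_cases hm : '\n' ∈ cs
      · have hlt : cs.idxOf '\n' < cs.length := List.idxOf_lt_length_of_mem hm
        have hidx : (c :: cs).idxOf '\n' = cs.idxOf '\n' + 1 := by
          simp [hc]
        simp only [List.mem_cons, hm, or_true, if_true, hidx]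
        have : (cs.idxOf '\n' + 1 = (c :: cs).length - 1) ↔ (cs.idxOf '\n' = cs.length - 1) := by
          simp only [List.length_cons]
          omega
        by_cases h : cs.idxOf '\n' = cs.length - 1
        · rw [if_pos h, if_pos (this.mpr h)]
        · rw [if_neg h, if_neg (fun hh => h (this.mp hh))]
      · have : ¬ '\n' ∈ (c :: cs) := by
          simp only [List.mem_cons, not_or]
          exact ⟨fun h => hc h.symm, hm⟩
        simp [this, hm]

-- computing Python's s.find('\n') : it is -1 if absent, else the first index
theorem pvFind_go_nl (cs : List Char) (k : Nat) :
    PySem.Chars.find.go ['\n'] cs k =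
      if '\n' ∈ cs then ((k : Int) + cs.idxOf '\n') else -1 := by
  induction cs generalizing k with
  | nil => rfl
  | cons c cs ih =>
    by_cases hc : c = '\n'
    · subst hc
      simp [PySem.Chars.find.go, List.isPrefixOf]
    · have hb : (('\n' : Char) == c) = false := by
        simp only [beq_eq_false_iff_ne, ne_eq]; exact fun h => hc h.symm
      have hpre : List.isPrefixOf ['\n'] (c :: cs) = false := by
        simp [List.isPrefixOf, hb]
      rw [PySem.Chars.find.go, hpre]
      simp only [Bool.false_eq_true, if_false, ih]
      have hidx : (c :: cs).idxOf '\n' = cs.idxOf '\n' + 1 := by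
        simp [hc]
      by_cases hm : '\n' ∈ cs
      · simp only [hm, if_true, List.mem_cons, or_true, hidx]
        push_cast
        ring
      · have : ¬ '\n' ∈ (c :: cs) := by
          simp only [List.mem_cons, not_or]
          exact ⟨fun h => hc h.symm, hm⟩
        simp [hm, this]

theorem pvFind_nl (cs : List Char) :
    PySem.Chars.find cs ['\n'] =
      if '\n' ∈ cs then (cs.idxOf '\n' : Int) else -1 := by
  have := pvFind_go_nl cs 0
  simpa [PySem.Chars.find] using this

-- ===== VERDICT (by name: the statement is the Claim_ definition above) =====
theorem reconhece_comentario_java_spec : Claim_equal_reconhece_comentario_java := by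
  unfold Claim_equal_reconhece_comentario_java
  intro entrada _
  unfold Spec_reconhece_comentario_java reconhece_comentario_java reconhece_comentario_java_alt
  simp only [PySem.Str.startswith_eq, PySem.Str.find_eq, PySem.Str.len_eq]
  rcases hl : entrada.toList with _ | ⟨c1, rest1⟩
  · rfl
  rcases rest1 with _ | ⟨c2, rest⟩
  · -- single character: A ends in Q1 or Q4, B's startswith is false
    by_cases h1 : c1 = '/' <;>
      simp [pvStep, PySem.Chars.startswith, List.isPrefixOf, h1]
  by_cases h1 : c1 = '/'
  · by_cases h2 : c2 = '/'
    · subst h1; subst h2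
      -- main case: the string starts with "//"
      have hsw : PySem.Chars.startswith ('/' :: '/' :: rest) "//".toList = true := by
        simp [PySem.Chars.startswith, List.isPrefixOf]
      have hfold : ('/' :: '/' :: rest).foldl pvStep 0 = rest.foldl pvStep 2 := by
        simp [pvStep]
      rw [hfold, hsw, pvFoldl_step_two]
      have hnl : "\n".toList = ['\n'] := rfl
      rw [hnl]
      have hmem : '\n' ∈ ('/' :: '/' :: rest) ↔ '\n' ∈ rest := by simp
      rw [pvFind_nl]
      by_cases hm : '\n' ∈ rest
      · have hidx : ('/' :: '/' :: rest).idxOf '\n' = rest.idxOf '\n' + 2 := by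
          simp
        have hlt : rest.idxOf '\n' < rest.length := List.idxOf_lt_length_of_mem hm
        rw [if_pos hm, if_pos (hmem.mpr hm), hidx]
        by_cases h : rest.idxOf '\n' = rest.length - 1
        · rw [if_pos h]
          simp only [Bool.not_true, PySem.Set.contains, PySem.Set.ofList]
          have : ((rest.idxOf '\n' + 2 : Nat) : Int) = (('/' :: '/' :: rest).length : Int) - 1 := by
            simp only [List.length_cons]
            omega
          simp [this]
        · rw [if_neg h]
          simp only [PySem.Set.contains, PySem.Set.ofList]
          simp
          constructor <;> omega
      · rw [if_neg hm, if_neg (fun h => hm (hmem.mp h))]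
        simp [PySem.Set.contains, PySem.Set.ofList]
    · -- "/x...": A traps in Q4, B's startswith is false
      subst h1
      have h4 : ('/' :: c2 :: rest).foldl pvStep 0 = 4 := by
        simp [pvStep, h2, pvFoldl_step_four]
      have hb : (('/' : Char) == c2) = false := by
        simp only [beq_eq_false_iff_ne, ne_eq]; exact fun h => h2 h.symm
      have hsw : PySem.Chars.startswith ('/' :: c2 :: rest) "//".toList = false := by
        simp [PySem.Chars.startswith, List.isPrefixOf, hb]
      rw [h4, hsw]
      rfl
  · -- first char is not '/': A traps in Q4, B's startswith is false
    have h4 : (c1 :: c2 :: rest).foldl pvStep 0 = 4 := by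
      simp [pvStep, h1, pvFoldl_step_four]
    have hb : (('/' : Char) == c1) = false := by
      simp only [beq_eq_false_iff_ne, ne_eq]; exact fun h => h1 h.symm
    have hsw : PySem.Chars.startswith (c1 :: c2 :: rest) "//".toList = false := by
      simp [PySem.Chars.startswith, List.isPrefixOf, hb]
    rw [h4, hsw]
    rfl
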